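-- pv_equiv track=rewrite | github.com/AgPipeline/transformer-soilmask | test.py | find_json
-- ===== SOURCE A (Python) =====
-- def find_json(text):
--     """
--     Find the JSON by looking for '{' and '}' on single lines.
--     This is a terrible assumption but it might work for now.
--     """
--
--     ret = []
--     start, stop = False, False
--     for line in text.splitlines():
--         if line == '{':
--             start = True
--         elif line == '}':
--             stop = True
--
--         if start:
--             ret.append(line)
--
--         if stop:
--             break
--
--     return ''.join(ret)
-- ===== SOURCE B (Python) =====
-- def find_json(text):
--     lines = text.splitlines()
--     try:
--         i = lines.index('{')
--     except ValueError:
--         return ''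
--     try:
--         j = lines.index('}')
--     except ValueError:
--         return ''.join(lines[i:])
--     if j < i:
--         return ''
--     return ''.join(lines[i:j + 1])
-- ===== Notes on version B (the rewrite author's own statement) =====
-- stated objective: simpler
-- what changed: Replaces the flag-driven accumulation loop with two boundary-index lookups (first line '{', first line '}') and a single slice+join.
import Mathlib
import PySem

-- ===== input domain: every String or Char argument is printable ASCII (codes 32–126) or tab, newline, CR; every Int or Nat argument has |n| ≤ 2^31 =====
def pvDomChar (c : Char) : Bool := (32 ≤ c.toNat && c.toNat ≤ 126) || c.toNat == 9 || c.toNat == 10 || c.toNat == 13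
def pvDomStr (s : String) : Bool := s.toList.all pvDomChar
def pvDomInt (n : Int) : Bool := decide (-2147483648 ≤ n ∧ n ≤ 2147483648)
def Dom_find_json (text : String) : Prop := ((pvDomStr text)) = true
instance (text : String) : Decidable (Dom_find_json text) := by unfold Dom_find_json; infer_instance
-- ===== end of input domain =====

-- B replaces A's flag-driven accumulation loop with boundary-index lookups plus a slice (simpler decomposition, same cost).


-- ===== PORT A =====
-- the for-loop with flags 'start'/'stop'; setting 'stop' causes an immediate break, so it is the branch condition
def findJsonLoop : List String → Bool → List String
  | [], _ => []
  | line :: rest, start =>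
    let start := if line == "{" then true else start
    let stop := if line == "{" then false else line == "}"
    let ret := if start then [line] else []
    if stop then ret else ret ++ findJsonLoop rest start

def find_json (text : String) : String :=
  PySem.Str.join "" (findJsonLoop (PySem.Str.splitlines text) false)

-- ===== PORT B =====
-- lines = text.splitlines(); i = lines.index('{') (None on ValueError), j = lines.index('}'); slice + join
def find_json_alt (text : String) : String :=
  match PySem.List.index? (PySem.Str.splitlines text) "{" with
  | none => ""
  | some i =>
    match PySem.List.index? (PySem.Str.splitlines text) "}" with
    | none => PySem.Str.join "" (PySem.List.slice (PySem.Str.splitlines text) (some (i : Int)) none)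
    | some j =>
      if j < i then ""
      else PySem.Str.join "" (PySem.List.slice (PySem.Str.splitlines text) (some (i : Int)) (some ((j : Int) + 1)))

-- ===== PRECONDITION & SPEC =====
def Spec_find_json (text : String) (out : String) : Prop := out = find_json_alt text
instance (text : String) (out : String) : Decidable (Spec_find_json text out) := by unfold Spec_find_json; infer_instance

-- ===== CLAIM (what is proved, stated in full; the proofs are below) =====
def Claim_equal_find_json : Prop := ∀ (text : String), Dom_find_json text → Spec_find_json text (find_json text)

-- ===== LEMMAS AND PROOFS =====

-- once 'start' is true, A keeps every line up to and including the first '}'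
theorem findJsonLoop_true (ls : List String) :
    findJsonLoop ls true =
      (match PySem.List.index? ls "}" with
       | none => ls
       | some j => ls.take (j + 1)) := by
  induction ls with
  | nil => rfl
  | cons l ls ih =>
    by_cases h : l = "}"
    · subst h
      rw [PySem.List.index?_cons_self]
      simp [findJsonLoop]
    · have hlb : (l == "}") = false := by simp [h]
      have hl : findJsonLoop (l :: ls) true = l :: findJsonLoop ls true := by
        simp [findJsonLoop, hlb]
      rw [hl, ih, PySem.List.index?_cons_of_ne _ h]
      cases hidx : PySem.List.index? ls "}" with
      | none => rfl
      | some j => rfl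

-- before 'start', A's result is determined by the positions of the first '{' and the first '}'
theorem findJsonLoop_false (ls : List String) :
    findJsonLoop ls false =
      (match PySem.List.index? ls "{", PySem.List.index? ls "}" with
       | none, _ => []
       | some i, none => ls.drop i
       | some i, some j => if j < i then [] else (ls.drop i).take (j + 1 - i)) := by
  induction ls with
  | nil => rfl
  | cons l ls ih =>
    by_cases hb : l = "{"
    · subst hb
      have hl : findJsonLoop ("{" :: ls) false = "{" :: findJsonLoop ls true := by
        simp [findJsonLoop]
      rw [hl, findJsonLoop_true, PySem.List.index?_cons_self,
          PySem.List.index?_cons_of_ne _ (show ("{" : String) ≠ "}" by decide)]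
      cases hidx : PySem.List.index? ls "}" with
      | none => rfl
      | some j =>
        dsimp only [Option.map]
        rw [if_neg (by omega : ¬ (j + 1 < 0))]
        simp [List.take_succ_cons]
    · by_cases h : l = "}"
      · subst h
        have hl : findJsonLoop ("}" :: ls) false = [] := by
          simp [findJsonLoop]
        rw [hl, PySem.List.index?_cons_self,
            PySem.List.index?_cons_of_ne _ (show ("}" : String) ≠ "{" by decide)]
        cases hidx : PySem.List.index? ls "{" with
        | none => rfl
        | some i =>
          dsimp only [Option.map]
          rw [if_pos (by omega : 0 < i + 1)]
      · have hlb1 : (l == "{") = false := by simp [hb]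
        have hlb2 : (l == "}") = false := by simp [h]
        have hl : findJsonLoop (l :: ls) false = findJsonLoop ls false := by
          simp [findJsonLoop, hlb1, hlb2]
        rw [hl, ih, PySem.List.index?_cons_of_ne _ hb, PySem.List.index?_cons_of_ne _ h]
        cases hi : PySem.List.index? ls "{" with
        | none => rfl
        | some i =>
          cases hj : PySem.List.index? ls "}" with
          | none => rfl
          | some j =>
            dsimp only [Option.map]
            by_cases hlt : j < i
            · rw [if_pos hlt, if_pos (by omega : j + 1 < i + 1)]
            · rw [if_neg hlt, if_neg (by omega : ¬ (j + 1 < i + 1)),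
                  (by omega : j + 1 + 1 - (i + 1) = j + 1 - i), List.drop_succ_cons]

-- ===== VERDICT (by name: the statement is the Claim_ definition above) =====
theorem find_json_spec : Claim_equal_find_json := by
  intro text _
  unfold Spec_find_json find_json find_json_alt
  rw [findJsonLoop_false]
  cases hi : PySem.List.index? (PySem.Str.splitlines text) "{" with
  | none => rfl
  | some i =>
    cases hj : PySem.List.index? (PySem.Str.splitlines text) "}" with
    | none =>
      dsimp only
      rw [PySem.List.slice_from _ (Int.natCast_nonneg i)]
      simp
    | some j =>
      dsimp only
      by_cases hlt : j < i
      · rw [if_pos hlt, if_pos hlt]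
        rfl
      · rw [if_neg hlt, if_neg hlt,
            PySem.List.slice_toNat _ (Int.natCast_nonneg i) (by positivity)]
        have h1 : ((j : Int) + 1).toNat = j + 1 := by omega
        have h2 : ((i : Int)).toNat = i := by omega
        rw [h1, h2]
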